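-- pv_equiv track=rewrite | github.com/bj0/aoc | 2018/d2.py | part1
-- ===== SOURCE A (Python) =====
-- def part1(input):
--     input = input.split('\n')
--
--     twos = 0
--     threes = 0
--     for line in input:
--         box = {}
--         for c in line:
--             n = box.get(c, 0)
--             box[c] = n + 1
--         if any(box[k] == 2 for k in box):
--             twos += 1
--         if any(box[k] == 3 for k in box):
--             threes += 1
--
--     return twos, threes, twos * threes
-- ===== SOURCE B (Python) =====
-- def part1(input):
--     twos = 0
--     threes = 0
--     for line in input.split('\n'):
--         # run lengths of the sorted line = multiset of character frequencies
--         runs = set()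
--         cur = None
--         k = 0
--         for ch in sorted(line):
--             if ch == cur:
--                 k += 1
--             else:
--                 if cur is not None:
--                     runs.add(k)
--                 cur = ch
--                 k = 1
--         if cur is not None:
--             runs.add(k)
--         if 2 in runs:
--             twos += 1
--         if 3 in runs:
--             threes += 1
--     return twos, threes, twos * threes
-- ===== Notes on version B (the rewrite author's own statement) =====
-- stated objective: alternative
-- what changed: Replaces the per-line frequency dictionary with a sort-then-group pass: each line is sorted and the set of run lengths of equal adjacent characters (the multiset of character frequencies) is scanned for 2 and 3.
import Mathlib
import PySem

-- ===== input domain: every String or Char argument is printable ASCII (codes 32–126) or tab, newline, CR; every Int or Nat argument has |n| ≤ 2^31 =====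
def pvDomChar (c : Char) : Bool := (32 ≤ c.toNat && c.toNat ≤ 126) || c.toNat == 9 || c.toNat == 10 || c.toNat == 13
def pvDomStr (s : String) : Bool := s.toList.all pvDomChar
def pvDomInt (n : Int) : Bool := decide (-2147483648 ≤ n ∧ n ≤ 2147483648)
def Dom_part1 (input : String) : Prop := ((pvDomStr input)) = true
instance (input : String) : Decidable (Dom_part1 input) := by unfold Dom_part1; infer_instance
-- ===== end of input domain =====

-- B replaces A's per-line frequency dict by sorting the line and collecting the set of run
-- lengths of equal adjacent characters; objective: alternative algorithm, same results.

-- ===== PORT A =====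
def part1 (input : String) : Int × Int × Int :=
  let lines := (PySem.Str.split? input "\n").getD [input]   -- sep = "\n" ≠ "", so split? is always some
  let tt : Int × Int := lines.foldl (fun st line =>
      let box := line.toList.foldl (fun d c => d.insert c (d.getD c 0 + 1))
                   (PySem.Dict.empty : PySem.Dict Char Int)
      let st1 := if box.items.any (fun kv => kv.2 == 2) then (st.1 + 1, st.2) else st
      if box.items.any (fun kv => kv.2 == 3) then (st1.1, st1.2 + 1) else st1)
    (0, 0)
  (tt.1, tt.2, tt.1 * tt.2)

-- ===== PORT B =====
-- state of B's inner loop: (runs, cur, k)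
def bStep (st : PySem.Set Int × Option Char × Int) (ch : Char) :
    PySem.Set Int × Option Char × Int :=
  if st.2.1 == some ch then (st.1, st.2.1, st.2.2 + 1)
  else ((match st.2.1 with
         | none => st.1
         | some _ => PySem.Set.add st.1 st.2.2), some ch, 1)

-- the post-loop 'if cur is not None: runs.add(k)'
def bFin (st : PySem.Set Int × Option Char × Int) : PySem.Set Int :=
  match st.2.1 with
  | none => st.1
  | some _ => PySem.Set.add st.1 st.2.2

def bRuns (line : String) : PySem.Set Int :=
  bFin ((PySem.List.sorted line.toList (fun c => c) false).foldl bStep (PySem.Set.empty, none, 0))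

def part1_alt (input : String) : Int × Int × Int :=
  let lines := (PySem.Str.split? input "\n").getD [input]
  let tt : Int × Int := lines.foldl (fun st line =>
      let runs := bRuns line
      let st1 := if PySem.Set.contains runs 2 then (st.1 + 1, st.2) else st
      if PySem.Set.contains runs 3 then (st1.1, st1.2 + 1) else st1)
    (0, 0)
  (tt.1, tt.2, tt.1 * tt.2)

-- ===== PRECONDITION & SPEC =====
def Spec_part1 (input : String) (out : Int × Int × Int) : Prop := out = part1_alt input
instance (input : String) (out : Int × Int × Int) : Decidable (Spec_part1 input out) := by unfold Spec_part1; infer_instance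

-- ===== CLAIM (what is proved, stated in full; the proofs are below) =====
def Claim_equal_part1 : Prop := ∀ (input : String), Dom_part1 input → Spec_part1 input (part1 input)

-- ===== LEMMAS AND PROOFS =====

-- A side: the dict test "some value equals n" is "some character occurs n times"
theorem box_any_eq (l : List Char) (n : Int) :
    ((l.foldl (fun d c => d.insert c (d.getD c 0 + 1)) (PySem.Dict.empty : PySem.Dict Char Int)).items.any
        (fun kv => kv.2 == n))
      = l.any (fun c => (l.count c : Int) == n) := by
  rw [PySem.Dict.foldl_insert_getD_add_one_eq_counter, PySem.Dict.items_counter]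
  rw [List.any_map, Bool.eq_iff_iff]
  simp only [List.any_eq_true, Function.comp]
  constructor
  · rintro ⟨c, hc, h⟩
    exact ⟨c, (PySem.Set.mem_ofList _ _).1 hc, h⟩
  · rintro ⟨c, hc, h⟩
    exact ⟨c, (PySem.Set.mem_ofList _ _).2 hc, h⟩

-- B side helper facts
theorem bStep_none (runs : PySem.Set Int) (j : Int) (ch : Char) :
    bStep (runs, none, j) ch = (runs, some ch, 1) := by
  simp [bStep]

theorem bStep_same (runs : PySem.Set Int) (c : Char) (j : Int) :
    bStep (runs, some c, j) c = (runs, some c, j + 1) := by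
  simp [bStep]

theorem bStep_new (runs : PySem.Set Int) (c : Char) (j : Int) (ch : Char) (h : ch ≠ c) :
    bStep (runs, some c, j) ch = (PySem.Set.add runs j, some ch, 1) := by
  simp [bStep, Ne.symm h]

theorem foldl_replicate_bStep (m : Nat) (c : Char) (runs : PySem.Set Int) (j : Int) :
    (List.replicate m c).foldl bStep (runs, some c, j) = (runs, some c, j + m) := by
  induction m generalizing j with
  | zero => simp
  | succ m ih =>
    rw [List.replicate_succ, List.foldl_cons, bStep_same, ih]
    simp [Prod.ext_iff]
    omega

-- the head of dropWhile fails the predicate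
theorem head_dropWhile_false {α : Type} (p : α → Bool) (l : List α) (y : α) (r : List α)
    (h : l.dropWhile p = y :: r) : p y = false := by
  induction l with
  | nil => simp at h
  | cons a t ih =>
    by_cases hp : p a = true
    · rw [List.dropWhile_cons_of_pos hp] at h; exact ih h
    · rw [List.dropWhile_cons_of_neg hp] at h
      cases h; simpa using hp

-- decomposition of a sorted list: the first run, then a sorted remainder without its character
theorem sorted_head_run (x : Char) (t : List Char)
    (hs : List.Pairwise (fun a b : Char => a ≤ b) (x :: t)) :
    ∃ k r, t = List.replicate k x ++ r ∧ x ∉ r ∧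
      List.Pairwise (fun a b : Char => a ≤ b) r ∧ r.length ≤ t.length := by
  have hpt := (List.pairwise_cons.1 hs).2
  have hxle := (List.pairwise_cons.1 hs).1
  refine ⟨(t.takeWhile (fun a => a == x)).length, t.dropWhile (fun a => a == x), ?_, ?_,
    hpt.sublist (List.dropWhile_sublist _), (List.dropWhile_sublist _).length_le⟩
  · conv_lhs => rw [← List.takeWhile_append_dropWhile (p := fun a => a == x) (l := t)]
    congr 1
    rw [List.eq_replicate_iff]
    exact ⟨rfl, fun b hb => by simpa using List.mem_takeWhile_imp hb⟩
  · intro hxmem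
    have hpr := hpt.sublist (List.dropWhile_sublist (p := fun a => a == x))
    cases hrr : t.dropWhile (fun a => a == x) with
    | nil => rw [hrr] at hxmem; simp at hxmem
    | cons y r' =>
      rw [hrr] at hxmem hpr
      have hyx : y ≠ x := by
        simpa using head_dropWhile_false _ t y r' hrr
      have hxr' : x ∈ r' := by
        rcases List.mem_cons.1 hxmem with h | h
        · exact absurd h.symm hyx
        · exact h
      have h1 : y ≤ x := (List.pairwise_cons.1 hpr).1 x hxr'
      have h2 : x ≤ y := hxle y ((List.dropWhile_sublist (p := fun a => a == x)).subset
        (by rw [hrr]; exact List.mem_cons_self))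
      exact hyx (le_antisymm h1 h2)

-- core invariant: over a sorted list the collected run lengths are exactly the counts
theorem runsCore (s : List Char) (hs : List.Pairwise (fun a b : Char => a ≤ b) s)
    (runs : PySem.Set Int) (n : Int) :
    (n ∈ bFin (s.foldl bStep (runs, none, 0))) ↔
      (n ∈ runs ∨ ∃ c ∈ s, (s.count c : Int) = n) := by
  match s with
  | [] => simp [bFin]
  | x :: t =>
    obtain ⟨k, r, ht, hxr, hpr, hlenr⟩ := sorted_head_run x t hs
    have hcx : (x :: t).count x = k + 1 := by
      rw [ht]
      simp [List.count_append, List.count_eq_zero.2 hxr]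
    have hcother : ∀ c, c ≠ x → (x :: t).count c = r.count c := by
      intro c hc
      rw [ht]
      simp [List.count_append, List.count_replicate, Ne.symm hc]
    have hfold : (x :: t).foldl bStep (runs, none, 0) = r.foldl bStep (runs, some x, 1 + k) := by
      conv_lhs => rw [ht]
      rw [List.foldl_cons, bStep_none, List.foldl_append, foldl_replicate_bStep]
    cases hrr : r with
    | nil =>
      subst hrr
      rw [hfold]
      simp only [List.foldl_nil, bFin, PySem.Set.mem_add]
      constructor
      · rintro (h | h)
        · exact Or.inl h
        · exact Or.inr ⟨x, by simp, by rw [hcx]; push_cast; omega⟩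
      · rintro (h | ⟨c, hc, hcount⟩)
        · exact Or.inl h
        · have hcx' : c = x := by
            rcases List.mem_cons.1 hc with h' | h'
            · exact h'
            · rw [ht] at h'
              exact List.eq_of_mem_replicate (by simpa using h')
          subst hcx'
          right
          rw [hcx] at hcount
          push_cast at hcount ⊢
          omega
    | cons y r' =>
      subst hrr
      have hyx : y ≠ x := fun h => hxr (h ▸ List.mem_cons_self)
      have hfold2 : (y :: r').foldl bStep (runs, some x, 1 + k)
          = (y :: r').foldl bStep (PySem.Set.add runs (1 + k), none, 0) := by
        rw [List.foldl_cons, List.foldl_cons, bStep_new _ _ _ _ hyx, bStep_none]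
      have hlen : (y :: r').length < (x :: t).length := by
        simp only [List.length_cons] at hlenr ⊢
        omega
      rw [hfold, hfold2, runsCore (y :: r') hpr (PySem.Set.add runs (1 + k)) n,
        PySem.Set.mem_add]
      constructor
      · rintro ((h | h) | ⟨c, hc, hcount⟩)
        · exact Or.inl h
        · exact Or.inr ⟨x, by simp, by rw [hcx]; push_cast; omega⟩
        · have hcnx : c ≠ x := fun hcx' => hxr (hcx' ▸ hc)
          exact Or.inr ⟨c, by rw [ht]; simp [hc], by rw [hcother c hcnx]; exact hcount⟩
      · rintro (h | ⟨c, hc, hcount⟩)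
        · exact Or.inl (Or.inl h)
        · by_cases hcx' : c = x
          · subst hcx'
            rw [hcx] at hcount
            left; right
            push_cast at hcount ⊢
            omega
          · right
            refine ⟨c, ?_, by rw [← hcother c hcx']; exact hcount⟩
            rcases List.mem_cons.1 hc with h' | h'
            · exact absurd h' hcx'
            · rw [ht] at h'
              rcases List.mem_append.1 h' with h'' | h''
              · exact absurd (List.eq_of_mem_replicate h'') hcx'
              · exact h''
termination_by s.length
decreasing_by exact hlen

-- B side: the run-length set of the sorted line contains n iff some character occurs n times
theorem bRuns_contains (line : String) (n : Int) :
    PySem.Set.contains (bRuns line) n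
      = line.toList.any (fun c => (line.toList.count c : Int) == n) := by
  rw [Bool.eq_iff_iff, PySem.Set.contains_iff]
  unfold bRuns
  rw [runsCore _ (PySem.List.sorted_pairwise _ _) PySem.Set.empty n]
  simp only [List.any_eq_true, beq_iff_eq]
  constructor
  · rintro (h | ⟨c, hc, hcount⟩)
    · simp [PySem.Set.empty] at h
    · refine ⟨c, (PySem.List.mem_sorted _ _ _ _).1 hc, ?_⟩
      rwa [(PySem.List.sorted_perm line.toList (fun c => c) false).count_eq] at hcount
  · rintro ⟨c, hc, hcount⟩
    refine Or.inr ⟨c, (PySem.List.mem_sorted _ _ _ _).2 hc, ?_⟩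
    rwa [(PySem.List.sorted_perm line.toList (fun c => c) false).count_eq]

-- ===== VERDICT (by name: the statement is the Claim_ definition above) =====
theorem part1_spec : Claim_equal_part1 := by
  intro input _
  unfold Spec_part1 part1 part1_alt
  simp only [box_any_eq, bRuns_contains]
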